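-- pv_equiv track=rewrite | github.com/yfh667/generic | utilis/adjacency.py | complete_undirected_graph
-- ===== SOURCE A (Python) =====
-- def complete_undirected_graph(adjacency_list):
--     """
--     补全无向图的邻接表，确保所有边的双向性
--
--     参数:
--         adjacency_list: 原始的邻接表（字典形式，值可以是集合或列表）
--
--     返回:
--         补全后的对称邻接表（所有值转为集合）
--     """
--     # 首先复制原始邻接表（避免修改原数据）
--     fixed_adj = {node: set(neighbors) for node, neighbors in adjacency_list.items()}
--
--     # 遍历每个节点及其邻居
--     for node in list(fixed_adj.keys()):  # 使用list()避免字典大小变化问题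
--         for neighbor in fixed_adj[node]:
--             # 如果邻居不在邻接表中，先添加它
--             if neighbor not in fixed_adj:
--                 fixed_adj[neighbor] = set()
--             # 确保邻居的邻接列表包含当前节点
--             if node not in fixed_adj[neighbor]:
--                 fixed_adj[neighbor].add(node)
--
--     return fixed_adj
-- ===== SOURCE B (Python) =====
-- def complete_undirected_graph(adjacency_list):
--     """Symmetrize via a separately built reverse-adjacency index, combined by set union."""
--     forward = {node: set(neighbors) for node, neighbors in adjacency_list.items()}
--     reverse = {}
--     for node, neighbors in forward.items():
--         for nb in neighbors:
--             reverse.setdefault(nb, set()).add(node)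
--     result = {}
--     for node, neighbors in forward.items():
--         result[node] = neighbors | reverse.get(node, set())
--     for node, sources in reverse.items():
--         if node not in result:
--             result[node] = set(sources)
--     return result
-- ===== Notes on version B (the rewrite author's own statement) =====
-- stated objective: alternative
-- what changed: B replaces A's in-place symmetrizing scan over a mutating dict by three independent passes: build a forward copy, build a reverse-adjacency index with setdefault, then combine forward and reverse by set union (appending reverse-only nodes).
import Mathlib
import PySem

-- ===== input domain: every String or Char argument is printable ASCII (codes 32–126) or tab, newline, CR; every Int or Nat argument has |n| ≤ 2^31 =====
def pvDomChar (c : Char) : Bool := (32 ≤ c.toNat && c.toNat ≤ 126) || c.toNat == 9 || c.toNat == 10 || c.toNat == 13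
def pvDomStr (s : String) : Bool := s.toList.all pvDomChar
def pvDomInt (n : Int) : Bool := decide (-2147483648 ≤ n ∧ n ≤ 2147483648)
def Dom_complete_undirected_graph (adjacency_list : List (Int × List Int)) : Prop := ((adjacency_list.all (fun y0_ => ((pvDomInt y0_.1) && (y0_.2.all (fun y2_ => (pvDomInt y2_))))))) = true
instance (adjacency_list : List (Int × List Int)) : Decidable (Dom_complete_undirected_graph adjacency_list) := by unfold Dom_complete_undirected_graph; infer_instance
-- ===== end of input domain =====

-- B symmetrizes the graph with a separately built reverse-adjacency index combined by set
-- union, instead of A's in-place symmetrizing scan over a mutating dict (alternative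
-- decomposition; same asymptotic cost).


-- ===== PORT A =====
-- body of A's inner loop: 'if neighbor not in fixed_adj: …; if node not in fixed_adj[neighbor]: fixed_adj[neighbor].add(node)'
def cugInner (node : Int) (d : PySem.Dict Int (PySem.Set Int)) (neighbor : Int) :
    PySem.Dict Int (PySem.Set Int) :=
  let d1 := if d.contains neighbor then d else d.insert neighbor PySem.Set.empty
  if (d1.getD neighbor PySem.Set.empty).contains node then d1
  else d1.modify neighbor PySem.Set.empty (fun s => PySem.Set.add s node)

-- one iteration of A's outer loop: 'for neighbor in fixed_adj[node]: …'
def cugStep (d : PySem.Dict Int (PySem.Set Int)) (node : Int) : PySem.Dict Int (PySem.Set Int) :=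
  (d.getD node PySem.Set.empty).foldl (cugInner node) d

def complete_undirected_graph (adjacency_list : List (Int × List Int)) : List (Int × List Int) :=
  let fixed_adj : PySem.Dict Int (PySem.Set Int) :=
    adjacency_list.foldl (fun d p => d.insert p.1 (PySem.Set.ofList p.2)) PySem.Dict.empty
  (fixed_adj.keys.foldl cugStep fixed_adj).items

-- ===== PORT B =====
def complete_undirected_graph_alt (adjacency_list : List (Int × List Int)) : List (Int × List Int) :=
  let forward : PySem.Dict Int (PySem.Set Int) :=
    adjacency_list.foldl (fun d p => d.insert p.1 (PySem.Set.ofList p.2)) PySem.Dict.empty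
  -- reverse.setdefault(nb, set()).add(node)
  let reverse : PySem.Dict Int (PySem.Set Int) :=
    forward.items.foldl
      (fun r p => p.2.foldl
        (fun r nb => r.modify nb PySem.Set.empty (fun s => PySem.Set.add s p.1)) r)
      PySem.Dict.empty
  -- result[node] = neighbors | reverse.get(node, set())
  let result : PySem.Dict Int (PySem.Set Int) :=
    forward.items.foldl
      (fun res p => res.insert p.1 (PySem.Set.union p.2 (reverse.getD p.1 PySem.Set.empty)))
      PySem.Dict.empty
  -- reverse-only nodes are appended with a fresh copy of their source set
  let result :=
    reverse.items.foldl
      (fun res q => if res.contains q.1 then res else res.insert q.1 (PySem.Set.ofList q.2))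
      result
  result.items

-- ===== PRECONDITION & SPEC =====
def Spec_complete_undirected_graph (adjacency_list : List (Int × List Int)) (out : List (Int × List Int)) : Prop := out = complete_undirected_graph_alt adjacency_list
instance (adjacency_list : List (Int × List Int)) (out : List (Int × List Int)) : Decidable (Spec_complete_undirected_graph adjacency_list out) := by unfold Spec_complete_undirected_graph; infer_instance

-- ===== CLAIM (what is proved, stated in full; the proofs are below) =====
def Claim_equal_complete_undirected_graph : Prop := ∀ (adjacency_list : List (Int × List Int)), Dom_complete_undirected_graph adjacency_list → Spec_complete_undirected_graph adjacency_list (complete_undirected_graph adjacency_list)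

-- ===== LEMMAS AND PROOFS =====
-- ===== proof-side helpers =====
-- the forward dict both ports build first
def cugBuild (l : List (Int × List Int)) : PySem.Dict Int (PySem.Set Int) :=
  l.foldl (fun d p => d.insert p.1 (PySem.Set.ofList p.2)) PySem.Dict.empty

-- sources pointing at k, in key order, restricted to the processed prefix P
def revL (P : List (Int × PySem.Set Int)) (k : Int) : List Int :=
  (P.filter (fun p => p.2.contains k)).map Prod.fst

-- items of the original keys after processing prefix P
def cugImap (I P : List (Int × PySem.Set Int)) : List (Int × PySem.Set Int) :=
  I.map (fun r => (r.1, PySem.Set.update r.2 (revL P r.1)))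

-- the new (neighbour-only) keys discovered while processing prefix P
def cugNKkeys (I P : List (Int × PySem.Set Int)) : List Int :=
  (PySem.Set.ofList (P.flatMap (fun p => p.2))).filter (fun k => !((I.map Prod.fst).contains k))

def cugNKitems (I P : List (Int × PySem.Set Int)) : List (Int × PySem.Set Int) :=
  (cugNKkeys I P).map (fun k => (k, (revL P k : PySem.Set Int)))

-- facts about the built dict
lemma cugBuild_inv (l : List (Int × List Int)) :
    (cugBuild l).keys.Nodup ∧ ∀ p ∈ (cugBuild l).items, List.Nodup p.2 := by
  suffices h : ∀ (l : List (Int × List Int)) (d : PySem.Dict Int (PySem.Set Int)),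
      d.keys.Nodup → (∀ p ∈ d.items, List.Nodup p.2) →
      (l.foldl (fun d p => d.insert p.1 (PySem.Set.ofList p.2)) d).keys.Nodup ∧
      ∀ p ∈ (l.foldl (fun d p => d.insert p.1 (PySem.Set.ofList p.2)) d).items, List.Nodup p.2 by
    exact h l PySem.Dict.empty (by simp [PySem.Dict.keys, PySem.Dict.empty]) (by simp [PySem.Dict.empty])
  intro l
  induction l with
  | nil => intro d h1 h2; exact ⟨h1, h2⟩
  | cons p rest ih =>
    intro d h1 h2
    refine ih _ (PySem.Dict.nodup_keys_insert _ _ _ h1) ?_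
    intro q hq
    rcases (PySem.Dict.mem_items_insert _ _ _ _).1 hq with h | h
    · subst h; exact PySem.Set.nodup_ofList _
    · exact h2 q h.1

lemma mem_revL (P : List (Int × PySem.Set Int)) (k m : Int) :
    k ∈ revL P m ↔ ∃ r ∈ P, r.1 = k ∧ m ∈ r.2 := by
  simp [revL, List.mem_filter, and_assoc, eq_comm]

lemma revL_nodup (P : List (Int × PySem.Set Int)) (k : Int)
    (h : (P.map Prod.fst).Nodup) : (revL P k).Nodup := by
  have : List.Sublist ((P.filter (fun p => p.2.contains k)).map Prod.fst) (P.map Prod.fst) :=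
    List.filter_sublist.map _
  exact h.sublist this

lemma revL_append (P Q : List (Int × PySem.Set Int)) (k : Int) :
    revL (P ++ Q) k = revL P k ++ revL Q k := by
  simp [revL]

lemma revL_single (p : Int × PySem.Set Int) (k : Int) :
    revL [p] k = if p.2.contains k then [p.1] else [] := by
  by_cases h : k ∈ p.2 <;> simp [revL, h]

-- items of cugInner
lemma cugInner_items (node : Int) (d : PySem.Dict Int (PySem.Set Int)) (nb : Int)
    (h : d.keys.Nodup) :
    (cugInner node d nb).items =
      if d.contains nb then
        d.items.map (fun q => if q.1 == nb then (q.1, PySem.Set.add q.2 node) else q)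
      else d.items ++ [(nb, ([node] : PySem.Set Int))] := by
  classical
  unfold cugInner
  by_cases hc : d.contains nb = true
  · simp only [hc, if_true]
    by_cases hn : (d.getD nb PySem.Set.empty).contains node = true
    · simp only [hn, if_true]
      have hid : ∀ q ∈ d.items,
          (if (q.1 == nb) = true then (q.1, PySem.Set.add q.2 node) else q) = id q := by
        intro q hq
        obtain ⟨q1, q2⟩ := q
        by_cases hqnb : q1 = nb
        · have hgd : d.getD q1 PySem.Set.empty = q2 :=
            PySem.Dict.getD_of_mem_items d (by exact hq) h _
          have hmem : node ∈ q2 := by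
            have := hn
            rw [← hqnb, hgd] at this
            simpa [PySem.Set.contains, List.contains_eq_mem] using this
          simp [hqnb, PySem.Set.add_of_mem hmem]
        · simp [hqnb]
      rw [List.map_congr_left hid, List.map_id]
    · rw [Bool.not_eq_true] at hn
      simp only [hn, Bool.false_eq_true, if_false]
      rw [PySem.Dict.modify, PySem.Dict.items_insert_of_contains d _ hc]
      apply List.map_congr_left
      intro q hq
      by_cases hqnb : q.1 = nb
      · have hgd : d.getD q.1 PySem.Set.empty = q.2 :=
          PySem.Dict.getD_of_mem_items d (by exact hq) h _
        simp only [hqnb, beq_self_eq_true, if_true]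
        rw [← hqnb, hgd]
      · simp [hqnb]
  · simp only [hc, Bool.false_eq_true, if_false]
    have hnomem : ∀ q ∈ d.items, q.1 ≠ nb := by
      intro q hq hqe
      have : d.contains nb = true := by
        refine (PySem.Dict.contains_iff_mem_keys d nb).2 ?_
        exact hqe ▸ List.mem_map_of_mem hq
      simp [this] at hc
    have hgd1 : (d.insert nb PySem.Set.empty).getD nb PySem.Set.empty = PySem.Set.empty :=
      PySem.Dict.getD_insert_self d nb _ _
    rw [hgd1]
    have hce : (PySem.Set.empty : PySem.Set Int).contains node = false := rfl
    rw [hce]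
    simp only [Bool.false_eq_true, if_false]
    rw [PySem.Dict.modify, hgd1,
      PySem.Dict.items_insert_of_contains _ _ (PySem.Dict.contains_insert_self d nb _),
      PySem.Dict.items_insert_of_not_contains d _ (by simpa using hc)]
    rw [List.map_append]
    have hid : ∀ q ∈ d.items,
        (if (q.1 == nb) = true then (nb, PySem.Set.add PySem.Set.empty node) else q) = id q := by
      intro q hq
      simp [hnomem q hq]
    rw [List.map_congr_left hid, List.map_id]
    congr 1
    simp [PySem.Set.add, PySem.Set.contains, PySem.Set.empty]

lemma key_ne_of_not_contains (d : PySem.Dict Int (PySem.Set Int)) (nb : Int)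
    (hc : d.contains nb = false) : ∀ q ∈ d.items, q.1 ≠ nb := by
  intro q hq hqe
  have : d.contains nb = true :=
    (PySem.Dict.contains_iff_mem_keys d nb).2 (hqe ▸ List.mem_map_of_mem hq)
  simp [this] at hc

lemma cugInner_keys (node : Int) (d : PySem.Dict Int (PySem.Set Int)) (nb : Int)
    (h : d.keys.Nodup) :
    (cugInner node d nb).keys = if d.contains nb then d.keys else d.keys ++ [nb] := by
  simp only [PySem.Dict.keys, cugInner_items node d nb h]
  by_cases hc : d.contains nb = true
  · simp only [hc, if_true, List.map_map]
    apply List.map_congr_left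
    intro q _
    by_cases hqnb : (q.1 == nb) = true <;> simp [hqnb, Function.comp]
  · simp [hc]

lemma cugInner_keys_nodup (node : Int) (d : PySem.Dict Int (PySem.Set Int)) (nb : Int)
    (h : d.keys.Nodup) : (cugInner node d nb).keys.Nodup := by
  rw [cugInner_keys node d nb h]
  by_cases hc : d.contains nb = true
  · simpa [hc] using h
  · have : nb ∉ d.keys := fun hm => by
      simp [(PySem.Dict.contains_iff_mem_keys d nb).2 hm] at hc
    simp only [hc, Bool.false_eq_true, if_false, List.nodup_append, List.nodup_cons]
    refine ⟨h, by simp, ?_⟩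
    intro a ha b hb
    rw [List.mem_singleton] at hb
    subst hb
    exact fun hh => this (hh ▸ ha)

-- the inner loop of A over the snapshot set ns
lemma foldl_cugInner_items (node : Int) :
    ∀ (ns : List Int) (d : PySem.Dict Int (PySem.Set Int)), d.keys.Nodup → ns.Nodup →
    (ns.foldl (cugInner node) d).items =
      d.items.map (fun q => if ns.contains q.1 then (q.1, PySem.Set.add q.2 node) else q)
        ++ (ns.filter (fun k => !(d.contains k))).map (fun k => (k, ([node] : PySem.Set Int))) := by
  intro ns
  induction ns with
  | nil => intro d _ _; simp
  | cons nb rest ih =>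
    intro d hkeys hns
    have hnbr : nb ∉ rest := (List.nodup_cons.1 hns).1
    have hrest : rest.Nodup := (List.nodup_cons.1 hns).2
    have hkeys' : (cugInner node d nb).keys.Nodup := cugInner_keys_nodup node d nb hkeys
    rw [List.foldl_cons, ih (cugInner node d nb) hkeys' hrest,
      cugInner_items node d nb hkeys]
    by_cases hc : d.contains nb = true
    · have hck : ∀ k, (cugInner node d nb).contains k = d.contains k := by
        intro k
        rw [PySem.Dict.contains_eq_decide_mem_keys, PySem.Dict.contains_eq_decide_mem_keys,
          cugInner_keys node d nb hkeys, if_pos hc]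
      simp only [hc, if_true, List.map_map]
      congr 1
      · apply List.map_congr_left
        intro q _
        by_cases hqnb : q.1 = nb
        · have : rest.contains q.1 = false := by
            simp [List.contains_eq_mem, hqnb, hnbr]
          simp [Function.comp, hqnb]
        · simp only [Function.comp_apply, beq_iff_eq, hqnb, if_false]
          have : (nb :: rest).contains q.1 = rest.contains q.1 := by
            simp [List.contains_eq_mem, hqnb]
          rw [this]
      · have hnb2 : (nb :: rest).filter (fun k => !d.contains k)
            = rest.filter (fun k => !d.contains k) := by
          simp [hc]
        rw [hnb2]
        congr 1
        apply List.filter_congr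
        intro k _
        rw [hck]
    · have hc' : d.contains nb = false := by simpa using hc
      have hnomem := key_ne_of_not_contains d nb hc'
      have hck : ∀ k, k ≠ nb → (cugInner node d nb).contains k = d.contains k := by
        intro k hk
        rw [PySem.Dict.contains_eq_decide_mem_keys, PySem.Dict.contains_eq_decide_mem_keys,
          cugInner_keys node d nb hkeys, if_neg (by simp [hc'])]
        simp [List.mem_append, hk]
      simp only [hc', Bool.false_eq_true, if_false, List.map_append]
      have h1 : ∀ q ∈ d.items,
          (if rest.contains q.1 = true then (q.1, PySem.Set.add q.2 node) else q)
            = (if (nb :: rest).contains q.1 = true then (q.1, PySem.Set.add q.2 node) else q) := by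
        intro q hq
        have : (nb :: rest).contains q.1 = rest.contains q.1 := by
          simp [List.contains_eq_mem, hnomem q hq]
        rw [this]
      rw [List.map_congr_left h1]
      have h2 : List.map (fun q => if rest.contains q.1 = true then (q.1, PySem.Set.add q.2 node) else q)
          [((nb : Int), ([node] : PySem.Set Int))] = [(nb, [node])] := by
        simp [List.contains_eq_mem, hnbr]
      rw [h2]
      have h3 : rest.filter (fun k => !(cugInner node d nb).contains k)
          = rest.filter (fun k => !d.contains k) := by
        apply List.filter_congr
        intro k hk
        rw [hck k (by rintro rfl; exact hnbr hk)]
      rw [h3]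
      have h4 : (nb :: rest).filter (fun k => !d.contains k)
          = nb :: rest.filter (fun k => !d.contains k) := by
        simp [hc']
      rw [h4]
      simp

lemma eq_of_mem_of_fst_eq {r r' : Int × PySem.Set Int} :
    ∀ (I : List (Int × PySem.Set Int)), (I.map Prod.fst).Nodup →
      r ∈ I → r' ∈ I → r.1 = r'.1 → r = r' := by
  intro I
  induction I with
  | nil => intro _ h; simp at h
  | cons p rest ih =>
    intro hnd hr hr' hfst
    rw [List.map_cons, List.nodup_cons] at hnd
    rcases List.mem_cons.1 hr with rfl | hr1
    · rcases List.mem_cons.1 hr' with rfl | hr1'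
      · rfl
      · refine absurd ?_ hnd.1
        rw [hfst]
        exact List.mem_map_of_mem (f := Prod.fst) hr1'
    · rcases List.mem_cons.1 hr' with rfl | hr1'
      · refine absurd ?_ hnd.1
        rw [← hfst]
        exact List.mem_map_of_mem (f := Prod.fst) hr1
      · exact ih hnd.2 hr1 hr1' hfst

lemma state_keys (I P : List (Int × PySem.Set Int)) :
    (cugImap I P ++ cugNKitems I P).map Prod.fst = I.map Prod.fst ++ cugNKkeys I P := by
  simp only [List.map_append, cugImap, cugNKitems, List.map_map]
  congr 1
  exact List.map_congr_left (fun r _ => rfl) |>.trans (List.map_id _) |>.symm ▸ rfl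

lemma cugNKkeys_not_mem (I P : List (Int × PySem.Set Int)) (k : Int)
    (h : k ∈ cugNKkeys I P) : k ∉ I.map Prod.fst := by
  have := (List.mem_filter.1 h).2
  simpa [List.contains_eq_mem] using this

lemma cugNKkeys_nodup (I P : List (Int × PySem.Set Int)) : (cugNKkeys I P).Nodup :=
  (PySem.Set.nodup_ofList _).filter _

lemma mem_cugNKkeys (I P : List (Int × PySem.Set Int)) (k : Int) :
    k ∈ cugNKkeys I P ↔ k ∈ P.flatMap (fun p => p.2) ∧ k ∉ I.map Prod.fst := by
  simp [cugNKkeys, List.mem_filter, PySem.Set.mem_ofList, List.contains_eq_mem]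

lemma state_keys_nodup (I P : List (Int × PySem.Set Int))
    (hK : (I.map Prod.fst).Nodup) : (I.map Prod.fst ++ cugNKkeys I P).Nodup := by
  rw [List.nodup_append]
  exact ⟨hK, cugNKkeys_nodup I P, fun a ha b hb hab =>
    cugNKkeys_not_mem I P b hb (hab ▸ ha)⟩

-- inner modify loop of B's reverse pass, lookup
lemma inner_rev_getD (m : Int) :
    ∀ (nbs : List Int) (r : PySem.Dict Int (PySem.Set Int)) (k : Int),
    ((nbs.foldl (fun r nb => r.modify nb PySem.Set.empty (fun s => PySem.Set.add s m)) r).getD k PySem.Set.empty)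
      = if k ∈ nbs then PySem.Set.add (r.getD k PySem.Set.empty) m else r.getD k PySem.Set.empty := by
  intro nbs
  induction nbs with
  | nil => intro r k; simp
  | cons nb rest ih =>
    intro r k
    rw [List.foldl_cons, ih]
    rw [PySem.Dict.getD_modify]
    by_cases h1 : k ∈ rest <;> by_cases h2 : k = nb
    · subst h2
      simp [h1]
    · simp [h1, h2]
    · simp [h2]
    · simp [h1, h2]

-- B's reverse pass, lookup
lemma rev_getD :
    ∀ (J : List (Int × PySem.Set Int)) (r : PySem.Dict Int (PySem.Set Int)) (k : Int),
    ((J.foldl (fun r p => p.2.foldl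
        (fun r nb => r.modify nb PySem.Set.empty (fun s => PySem.Set.add s p.1)) r) r).getD k PySem.Set.empty)
      = PySem.Set.update (r.getD k PySem.Set.empty) (revL J k) := by
  intro J
  induction J with
  | nil => intro r k; simp [revL]
  | cons p rest ih =>
    intro r k
    rw [List.foldl_cons, ih, inner_rev_getD]
    have : revL (p :: rest) k = revL [p] k ++ revL rest k := revL_append [p] rest k
    rw [this, revL_single, PySem.Set.update_append]
    by_cases h : k ∈ p.2
    · simp [h, PySem.Set.update_cons, PySem.Set.update_nil]
    · simp [h]

-- B's reverse pass, keys
lemma rev_keys :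
    ∀ (J : List (Int × PySem.Set Int)) (r : PySem.Dict Int (PySem.Set Int)),
    ((J.foldl (fun r p => p.2.foldl
        (fun r nb => r.modify nb PySem.Set.empty (fun s => PySem.Set.add s p.1)) r) r).keys)
      = PySem.Set.update r.keys (J.flatMap (fun p => p.2)) := by
  intro J
  induction J with
  | nil => intro r; simp
  | cons p rest ih =>
    intro r
    rw [List.foldl_cons, ih, PySem.Dict.keys_foldl_modify, List.flatMap_cons,
      PySem.Set.update_append]

lemma items_eq_map_keys (d : PySem.Dict Int (PySem.Set Int)) (h : d.keys.Nodup) :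
    d.items = d.keys.map (fun k => (k, d.getD k PySem.Set.empty)) := by
  rw [PySem.Dict.keys, List.map_map]
  symm
  calc d.items.map ((fun k => (k, d.getD k PySem.Set.empty)) ∘ Prod.fst)
      = d.items.map id := by
        apply List.map_congr_left
        intro q hq
        obtain ⟨q1, q2⟩ := q
        have := PySem.Dict.getD_of_mem_items d hq h ([] : PySem.Set Int)
        simp [Function.comp, this]
    _ = d.items := List.map_id _

-- a fold of inserts of fresh keys appends the corresponding items
lemma insert_fold_items (g : Int × PySem.Set Int → PySem.Set Int) :
    ∀ (J : List (Int × PySem.Set Int)) (d : PySem.Dict Int (PySem.Set Int)),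
    (J.map Prod.fst).Nodup → (∀ q ∈ J, d.contains q.1 = false) →
    ((J.foldl (fun res p => res.insert p.1 (g p)) d).items
      = d.items ++ J.map (fun p => (p.1, g p))) := by
  intro J
  induction J with
  | nil => intro d _ _; simp
  | cons p rest ih =>
    intro d hnd hfresh
    rw [List.map_cons, List.nodup_cons] at hnd
    rw [List.foldl_cons, ih _ hnd.2, List.map_cons,
      PySem.Dict.items_insert_of_not_contains d _ (hfresh p (List.mem_cons_self))]
    · simp
    · intro q hq
      rw [PySem.Dict.contains_insert]
      have : (q.1 == p.1) = false := by
        simp only [beq_eq_false_iff_ne, ne_eq]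
        intro hqe
        exact hnd.1 (hqe ▸ List.mem_map_of_mem hq)
      rw [this, Bool.false_or]
      exact hfresh q (List.mem_cons_of_mem _ hq)

-- B's final pass: skip present keys, append the fresh ones
lemma fold2_items (klist : List Int) :
    ∀ (J : List (Int × PySem.Set Int)) (res : PySem.Dict Int (PySem.Set Int)),
    (J.map Prod.fst).Nodup → (∀ q ∈ J, res.contains q.1 = klist.contains q.1) →
    ((J.foldl (fun res q => if res.contains q.1 then res
        else res.insert q.1 (PySem.Set.ofList q.2)) res).items
      = res.items ++ (J.filter (fun q => !(klist.contains q.1))).map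
          (fun q => (q.1, PySem.Set.ofList q.2))) := by
  intro J
  induction J with
  | nil => intro res _ _; simp
  | cons p rest ih =>
    intro res hnd hcont
    rw [List.map_cons, List.nodup_cons] at hnd
    have hp := hcont p (List.mem_cons_self)
    rw [List.foldl_cons, List.filter_cons]
    by_cases hres : res.contains p.1 = true
    · have hk : klist.contains p.1 = true := hp.symm.trans hres
      have hnk : (!klist.contains p.1) = false := by rw [hk]; rfl
      rw [if_pos hres, hnk]
      simp only [Bool.false_eq_true, if_false]
      exact ih res hnd.2 (fun q hq => hcont q (List.mem_cons_of_mem _ hq))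
    · have hres' : res.contains p.1 = false := by simpa using hres
      have hnk : (!klist.contains p.1) = true := by
        rw [hp.symm.trans hres']; rfl
      rw [if_neg hres, hnk]
      simp only [if_true]
      rw [ih _ hnd.2 ?_, PySem.Dict.items_insert_of_not_contains res _ hres']
      · simp
      · intro q hq
        rw [PySem.Dict.contains_insert]
        have hne : (q.1 == p.1) = false := by
          simp only [beq_eq_false_iff_ne, ne_eq]
          intro hqe
          exact hnd.1 (hqe ▸ List.mem_map_of_mem hq)
        rw [hne, Bool.false_or]
        exact hcont q (List.mem_cons_of_mem _ hq)

lemma mem_keys_of_mem_revL {P : List (Int × PySem.Set Int)} {k m : Int}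
    (h : k ∈ revL P m) : k ∈ P.map Prod.fst := by
  obtain ⟨r, hr, rfl, -⟩ := (mem_revL P k m).1 h
  exact List.mem_map_of_mem hr

lemma revL_eq_nil_of_not_mem_flat {P : List (Int × PySem.Set Int)} {k : Int}
    (h : k ∉ P.flatMap (fun p => p.2)) : revL P k = [] := by
  rw [revL, List.map_eq_nil_iff, List.filter_eq_nil_iff]
  intro r hr
  simp only [PySem.Set.contains, List.contains_eq_mem, decide_eq_true_eq]
  intro hk
  exact h (List.mem_flatMap.2 ⟨r, hr, hk⟩)

lemma cugStep_state (I₁ : List (Int × PySem.Set Int)) (p : Int × PySem.Set Int)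
    (I₂ : List (Int × PySem.Set Int))
    (hK : ((I₁ ++ p :: I₂).map Prod.fst).Nodup)
    (hV : ∀ r ∈ I₁ ++ p :: I₂, List.Nodup r.2) :
    cugStep (PySem.Dict.mk (cugImap (I₁ ++ p :: I₂) I₁ ++ cugNKitems (I₁ ++ p :: I₂) I₁)) p.1
      = PySem.Dict.mk (cugImap (I₁ ++ p :: I₂) (I₁ ++ [p]) ++ cugNKitems (I₁ ++ p :: I₂) (I₁ ++ [p])) := by
  set I : List (Int × PySem.Set Int) := I₁ ++ p :: I₂ with hI
  set d : PySem.Dict Int (PySem.Set Int) := PySem.Dict.mk (cugImap I I₁ ++ cugNKitems I I₁) with hd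
  have hpI : p ∈ I := by rw [hI]; exact List.mem_append_right _ (List.mem_cons_self)
  have hI1sub : ∀ r ∈ I₁, r ∈ I := fun r hr => by
    rw [hI]; exact List.mem_append_left _ hr
  have hp2nodup : p.2.Nodup := hV p hpI
  have hp1notI1 : p.1 ∉ I₁.map Prod.fst := by
    rw [hI, List.map_append, List.map_cons] at hK
    intro hmem
    exact (List.disjoint_of_nodup_append hK) hmem (List.mem_cons_self)
  have hditems : d.items = cugImap I I₁ ++ cugNKitems I I₁ := rfl
  have hkeys : d.keys = I.map Prod.fst ++ cugNKkeys I I₁ := by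
    rw [PySem.Dict.keys, hditems, state_keys]
  have hnd : d.keys.Nodup := by rw [hkeys]; exact state_keys_nodup I I₁ hK
  have hmemS : (p.1, PySem.Set.update p.2 (revL I₁ p.1)) ∈ d.items := by
    rw [hditems]
    exact List.mem_append_left _ (List.mem_map_of_mem (f := fun r => (r.1, PySem.Set.update r.2 (revL I₁ r.1))) hpI)
  have hgetD : d.getD p.1 PySem.Set.empty = PySem.Set.update p.2 (revL I₁ p.1) :=
    PySem.Dict.getD_of_mem_items d hmemS hnd _
  set ns : PySem.Set Int := PySem.Set.update p.2 (revL I₁ p.1) with hns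
  have hnsnodup : ns.Nodup := PySem.Set.nodup_update _ _ hp2nodup
  -- membership in ns
  have hnsmem : ∀ k, k ∈ ns ↔ k ∈ p.2 ∨ k ∈ revL I₁ p.1 := fun k => PySem.Set.mem_update _ _ _
  apply PySem.Dict.ext
  rw [cugStep, hgetD, foldl_cugInner_items p.1 ns d hnd hnsnodup, hditems, List.map_append]
  -- (1) the original-keys part
  have hA1 : (cugImap I I₁).map
      (fun q => if List.contains ns q.1 = true then (q.1, PySem.Set.add q.2 p.1) else q)
        = cugImap I (I₁ ++ [p]) := by
    rw [cugImap, cugImap, List.map_map]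
    apply List.map_congr_left
    intro r hr
    simp only [Function.comp_apply]
    have hsplit : PySem.Set.update r.2 (revL (I₁ ++ [p]) r.1)
        = PySem.Set.update (PySem.Set.update r.2 (revL I₁ r.1)) (revL [p] r.1) := by
      rw [revL_append, PySem.Set.update_append]
    by_cases hb : r.1 ∈ p.2
    · have hcont : List.contains ns r.1 = true := by
        rw [List.contains_eq_mem, decide_eq_true_eq]
        exact (hnsmem r.1).2 (Or.inl hb)
      have hrevp : revL [p] r.1 = [p.1] := by
        rw [revL_single, if_pos (by simpa [PySem.Set.contains, List.contains_eq_mem] using hb)]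
      simp only [hcont, if_true]
      rw [hsplit, hrevp, PySem.Set.update_cons, PySem.Set.update_nil]
    · have hrevp : revL [p] r.1 = [] := by
        rw [revL_single, if_neg (by simpa [PySem.Set.contains, List.contains_eq_mem] using hb)]
      rw [hsplit, hrevp, PySem.Set.update_nil]
      by_cases hc : r.1 ∈ revL I₁ p.1
      · obtain ⟨r', hr', hr'1, hpr'⟩ := (mem_revL I₁ r.1 p.1).1 hc
        have hrr : r' = r := eq_of_mem_of_fst_eq I hK (hI1sub r' hr') hr hr'1
        rw [hrr] at hpr'
        have hcont : List.contains ns r.1 = true := by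
          rw [List.contains_eq_mem, decide_eq_true_eq]
          exact (hnsmem r.1).2 (Or.inr hc)
        simp only [hcont, if_true]
        have hmemu : p.1 ∈ PySem.Set.update r.2 (revL I₁ r.1) :=
          (PySem.Set.mem_update _ _ _).2 (Or.inl hpr')
        rw [PySem.Set.add_of_mem hmemu]
      · have hcont : List.contains ns r.1 = false := by
          rw [List.contains_eq_mem, decide_eq_false_iff_not]
          intro hmem
          rcases (hnsmem r.1).1 hmem with h | h
          exacts [hb h, hc h]
        simp only [hcont, Bool.false_eq_true, if_false]
  -- (2) the already-discovered new-keys part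
  have hA2 : (cugNKitems I I₁).map
      (fun q => if List.contains ns q.1 = true then (q.1, PySem.Set.add q.2 p.1) else q)
        = (cugNKkeys I I₁).map (fun k => (k, (revL (I₁ ++ [p]) k : PySem.Set Int))) := by
    rw [cugNKitems, List.map_map]
    apply List.map_congr_left
    intro k hk
    simp only [Function.comp_apply]
    have hkK : k ∉ I.map Prod.fst := cugNKkeys_not_mem I I₁ k hk
    have hknotrev : k ∉ revL I₁ p.1 := fun h => by
      have := mem_keys_of_mem_revL h
      rw [hI] at hkK
      exact hkK (by rw [List.map_append]; exact List.mem_append_left _ this)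
    have hsplit : revL (I₁ ++ [p]) k = revL I₁ k ++ revL [p] k := revL_append _ _ _
    by_cases hb : k ∈ p.2
    · have hcont : List.contains ns k = true := by
        rw [List.contains_eq_mem, decide_eq_true_eq]
        exact (hnsmem k).2 (Or.inl hb)
      have hrevp : revL [p] k = [p.1] := by
        rw [revL_single, if_pos (by simpa [PySem.Set.contains, List.contains_eq_mem] using hb)]
      simp only [hcont, if_true]
      rw [hsplit, hrevp]
      have hp1no : p.1 ∉ revL I₁ k := fun h => hp1notI1 (mem_keys_of_mem_revL h)
      rw [PySem.Set.add_of_not_mem hp1no]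
    · have hcont : List.contains ns k = false := by
        rw [List.contains_eq_mem, decide_eq_false_iff_not]
        intro hmem
        rcases (hnsmem k).1 hmem with h | h
        exacts [hb h, hknotrev h]
      have hrevp : revL [p] k = [] := by
        rw [revL_single, if_neg (by simpa [PySem.Set.contains, List.contains_eq_mem] using hb)]
      simp only [hcont, Bool.false_eq_true, if_false]
      rw [hsplit, hrevp, List.append_nil]
  -- (3) the freshly appended keys
  set newks : List Int := p.2.filter
    (fun k => !(PySem.Set.ofList (I₁.flatMap (fun r => r.2))).contains k
      && !((I.map Prod.fst).contains k)) with hnewks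
  have hnewflat : ∀ k ∈ newks, k ∉ I₁.flatMap (fun r => r.2) := by
    intro k hk
    have := (List.mem_filter.1 hk).2
    simp only [Bool.and_eq_true, Bool.not_eq_true'] at this
    have h1 := this.1
    simp only [PySem.Set.contains, List.contains_eq_mem, decide_eq_false_iff_not,
      PySem.Set.mem_ofList] at h1
    exact h1
  have hA3 : (List.filter (fun k => !d.contains k) ns).map (fun k => (k, ([p.1] : PySem.Set Int)))
      = newks.map (fun k => (k, (revL (I₁ ++ [p]) k : PySem.Set Int))) := by
    have hdcont : ∀ k, d.contains k = decide (k ∈ I.map Prod.fst ++ cugNKkeys I I₁) := by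
      intro k
      rw [PySem.Dict.contains_eq_decide_mem_keys, hkeys]
    have hsplitns : (ns : List Int)
        = p.2 ++ (PySem.Set.ofList (revL I₁ p.1)).filter (fun y => !(PySem.Set.contains p.2 y)) :=
      PySem.Set.update_eq_append_filter p.2 _
    have hfilter : List.filter (fun k => !d.contains k) ns = newks := by
      rw [hsplitns, List.filter_append]
      have h2 : List.filter (fun k => !d.contains k)
          ((PySem.Set.ofList (revL I₁ p.1)).filter (fun y => !(PySem.Set.contains p.2 y))) = [] := by
        rw [List.filter_eq_nil_iff]
        intro a ha
        have hmem : a ∈ revL I₁ p.1 := by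
          have := (List.mem_filter.1 ha).1
          exact (PySem.Set.mem_ofList _ _).1 this
        have haI : a ∈ I.map Prod.fst := by
          rw [hI, List.map_append]
          exact List.mem_append_left _ (mem_keys_of_mem_revL hmem)
        rw [hdcont]
        simp [List.mem_append, haI]
      rw [h2, List.append_nil, hnewks]
      apply List.filter_congr
      intro k _
      rw [hdcont]
      by_cases h1 : k ∈ I.map Prod.fst
      · simp [List.mem_append, h1, List.contains_eq_mem]
      · by_cases h2 : k ∈ I₁.flatMap (fun r => r.2)
        · have : k ∈ cugNKkeys I I₁ := (mem_cugNKkeys I I₁ k).2 ⟨h2, h1⟩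
          simp [List.mem_append, h1, this, PySem.Set.contains, List.contains_eq_mem,
            PySem.Set.mem_ofList, h2]
        · have : k ∉ cugNKkeys I I₁ := fun hm => h2 ((mem_cugNKkeys I I₁ k).1 hm).1
          simp [List.mem_append, h1, this, PySem.Set.contains, List.contains_eq_mem,
            PySem.Set.mem_ofList, h2]
    rw [hfilter]
    apply List.map_congr_left
    intro k hk
    have hkp2 : k ∈ p.2 := List.mem_of_mem_filter hk
    have hrev1 : revL I₁ k = [] := revL_eq_nil_of_not_mem_flat (hnewflat k hk)
    have hrevp : revL [p] k = [p.1] := by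
      rw [revL_single, if_pos (by simpa [PySem.Set.contains, List.contains_eq_mem] using hkp2)]
    rw [revL_append, hrev1, hrevp]
    rfl
  have hNK : cugNKkeys I (I₁ ++ [p]) = cugNKkeys I I₁ ++ newks := by
    rw [cugNKkeys, List.flatMap_append]
    have hflatp : List.flatMap (fun p => p.2) [p] = p.2 := by simp
    rw [hflatp, PySem.Set.ofList_append, PySem.Set.update_eq_append_filter,
      PySem.Set.ofList_eq_self_of_nodup _ hp2nodup, List.filter_append, hnewks,
      List.filter_filter]
    congr 1
    apply List.filter_congr
    intro k _
    exact Bool.and_comm _ _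
  rw [hA1, hA2, hA3, List.append_assoc, ← List.map_append, ← hNK]
  rfl

lemma A_main :
    ∀ (I₂ I₁ : List (Int × PySem.Set Int)),
    (((I₁ ++ I₂).map Prod.fst).Nodup) → (∀ r ∈ I₁ ++ I₂, List.Nodup r.2) →
    (I₂.foldl (fun d q => cugStep d q.1)
        (PySem.Dict.mk (cugImap (I₁ ++ I₂) I₁ ++ cugNKitems (I₁ ++ I₂) I₁))).items
      = cugImap (I₁ ++ I₂) (I₁ ++ I₂) ++ cugNKitems (I₁ ++ I₂) (I₁ ++ I₂) := by
  intro I₂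
  induction I₂ with
  | nil => intro I₁ _ _; simp
  | cons p rest ih =>
    intro I₁ hK hV
    rw [List.foldl_cons, cugStep_state I₁ p rest hK hV]
    have hassoc : I₁ ++ p :: rest = (I₁ ++ [p]) ++ rest := by simp
    rw [hassoc] at hK hV ⊢
    exact ih (I₁ ++ [p]) hK hV

lemma A_items (l : List (Int × List Int)) :
    complete_undirected_graph l
      = cugImap (cugBuild l).items (cugBuild l).items
          ++ cugNKitems (cugBuild l).items (cugBuild l).items := by
  obtain ⟨hK, hV⟩ := cugBuild_inv l
  have h1 : complete_undirected_graph l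
      = (((cugBuild l).items.map Prod.fst).foldl cugStep (cugBuild l)).items := rfl
  rw [h1, List.foldl_map]
  have h2 : cugBuild l
      = PySem.Dict.mk (cugImap (cugBuild l).items [] ++ cugNKitems (cugBuild l).items []) := by
    apply PySem.Dict.ext
    show (cugBuild l).items = cugImap (cugBuild l).items [] ++ cugNKitems (cugBuild l).items []
    have : cugImap (cugBuild l).items [] = (cugBuild l).items := by
      rw [cugImap]
      have : ∀ r ∈ (cugBuild l).items,
          (r.1, PySem.Set.update r.2 (revL [] r.1)) = id r := by
        intro r _
        simp [revL, PySem.Set.update_nil]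
      rw [List.map_congr_left this, List.map_id]
    rw [this]
    simp [cugNKitems, cugNKkeys, revL, PySem.Set.ofList]
  have h3 := A_main (cugBuild l).items [] (by simpa using hK) (by simpa using hV)
  simp only [List.nil_append] at h3
  calc ((cugBuild l).items.foldl (fun d q => cugStep d q.1) (cugBuild l)).items
      = ((cugBuild l).items.foldl (fun d q => cugStep d q.1)
          (PySem.Dict.mk (cugImap (cugBuild l).items [] ++ cugNKitems (cugBuild l).items []))).items := by
        rw [← h2]
    _ = cugImap (cugBuild l).items (cugBuild l).items
          ++ cugNKitems (cugBuild l).items (cugBuild l).items := h3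

lemma B_items (l : List (Int × List Int)) :
    complete_undirected_graph_alt l
      = cugImap (cugBuild l).items (cugBuild l).items
          ++ cugNKitems (cugBuild l).items (cugBuild l).items := by
  obtain ⟨hK, hV⟩ := cugBuild_inv l
  set I : List (Int × PySem.Set Int) := (cugBuild l).items with hIdef
  have hKI : (I.map Prod.fst).Nodup := hK
  set R : PySem.Dict Int (PySem.Set Int) :=
    I.foldl (fun r p => p.2.foldl
      (fun r nb => r.modify nb PySem.Set.empty (fun s => PySem.Set.add s p.1)) r)
      PySem.Dict.empty with hR
  have hRgetD : ∀ k, R.getD k PySem.Set.empty = revL I k := by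
    intro k
    rw [hR, rev_getD]
    have : PySem.Dict.empty.getD k PySem.Set.empty = ([] : PySem.Set Int) := rfl
    rw [this, PySem.Set.update_nil_left, PySem.Set.ofList_eq_self_of_nodup _ (revL_nodup I k hKI)]
  have hRkeys : R.keys = PySem.Set.ofList (I.flatMap (fun p => p.2)) := by
    rw [hR, rev_keys]
    have : (PySem.Dict.empty : PySem.Dict Int (PySem.Set Int)).keys = [] := rfl
    rw [this, PySem.Set.update_nil_left]
  have hRkeysnd : R.keys.Nodup := by rw [hRkeys]; exact PySem.Set.nodup_ofList _
  set res1 : PySem.Dict Int (PySem.Set Int) :=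
    I.foldl (fun res p => res.insert p.1 (PySem.Set.union p.2 (R.getD p.1 PySem.Set.empty)))
      PySem.Dict.empty with hres1
  have hres1items : res1.items = cugImap I I := by
    rw [hres1, insert_fold_items _ I PySem.Dict.empty hKI (fun q _ => rfl)]
    have : ∀ p ∈ I, (p.1, PySem.Set.union p.2 (R.getD p.1 PySem.Set.empty))
        = (p.1, PySem.Set.update p.2 (revL I p.1)) := by
      intro p _
      rw [hRgetD p.1]
      rfl
    rw [List.map_congr_left this]
    rfl
  have hres1keys : res1.keys = I.map Prod.fst := by
    rw [PySem.Dict.keys, hres1items, cugImap, List.map_map]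
    apply List.map_congr_left
    intro r _
    rfl
  have hB : complete_undirected_graph_alt l
      = (R.items.foldl (fun res q => if res.contains q.1 then res
          else res.insert q.1 (PySem.Set.ofList q.2)) res1).items := rfl
  rw [hB, fold2_items (I.map Prod.fst) R.items res1 ?hnd ?hcont, hres1items]
  case hnd =>
    have : R.items.map Prod.fst = R.keys := rfl
    rw [this]
    exact hRkeysnd
  case hcont =>
    intro q _
    rw [PySem.Dict.contains_eq_decide_mem_keys, hres1keys, List.contains_eq_mem]
  congr 1
  rw [items_eq_map_keys R hRkeysnd, List.filter_map, List.map_map]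
  have hcomp : (fun q : Int × PySem.Set Int => !(I.map Prod.fst).contains q.1)
      ∘ (fun k => (k, R.getD k PySem.Set.empty)) = fun k => !(I.map Prod.fst).contains k := rfl
  rw [hcomp, hRkeys]
  show ((PySem.Set.ofList (I.flatMap (fun p => p.2))).filter
      (fun k => !(I.map Prod.fst).contains k)).map
        ((fun q : Int × PySem.Set Int => (q.1, PySem.Set.ofList q.2))
          ∘ (fun k => (k, R.getD k PySem.Set.empty)))
    = cugNKitems I I
  rw [cugNKitems, cugNKkeys]
  apply List.map_congr_left
  intro k hk
  simp only [Function.comp_apply]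
  rw [hRgetD k, PySem.Set.ofList_eq_self_of_nodup _ (revL_nodup I k hKI)]

lemma cug_equal (l : List (Int × List Int)) :
    complete_undirected_graph l = complete_undirected_graph_alt l := by
  rw [A_items, B_items]

-- ===== VERDICT (by name: the statement is the Claim_ definition above) =====
theorem complete_undirected_graph_spec : Claim_equal_complete_undirected_graph := by
  intro adjacency_list _
  show complete_undirected_graph adjacency_list = complete_undirected_graph_alt adjacency_list
  exact cug_equal adjacency_list
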